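-- pv_equiv track=rewrite | github.com/Melevir/opensource_watchman | src_mvp/opensource_watchman.py | get_total_stat
-- ===== SOURCE A (Python) =====
-- def get_total_stat(repos_context, repos_to_skip):
--     return {
--         'checked_repos_number': len(repos_context),
--         'skipped_repos_number': len(repos_to_skip),
--         'total_repos_number': len(repos_context) + len(repos_to_skip),
--         'ok_repos_number': sum(1 for r in repos_context.values() if r['status'] == 'ok'),
--         'repos_with_warnings_number': sum(1 for r in repos_context.values() if r['status'] == 'warning'),
--         'critical_repos_number': sum(1 for r in repos_context.values() if r['status'] == 'critical'),
--     }
-- ===== SOURCE B (Python) =====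
-- def get_total_stat(repos_context, repos_to_skip):
--     counts = {}
--     for r in repos_context.values():
--         s = r['status']
--         counts[s] = counts.get(s, 0) + 1
--     checked = len(repos_context)
--     skipped = len(repos_to_skip)
--     return {
--         'checked_repos_number': checked,
--         'skipped_repos_number': skipped,
--         'total_repos_number': checked + skipped,
--         'ok_repos_number': counts.get('ok', 0),
--         'repos_with_warnings_number': counts.get('warning', 0),
--         'critical_repos_number': counts.get('critical', 0),
--     }
-- ===== Notes on version B (the rewrite author's own statement) =====
-- stated objective: idiomatic
-- what changed: B builds one status-frequency table in a single pass over the values and reads the three counts from it with .get(key, 0), instead of A's three separate filtered scans of repos_context.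
import Mathlib
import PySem

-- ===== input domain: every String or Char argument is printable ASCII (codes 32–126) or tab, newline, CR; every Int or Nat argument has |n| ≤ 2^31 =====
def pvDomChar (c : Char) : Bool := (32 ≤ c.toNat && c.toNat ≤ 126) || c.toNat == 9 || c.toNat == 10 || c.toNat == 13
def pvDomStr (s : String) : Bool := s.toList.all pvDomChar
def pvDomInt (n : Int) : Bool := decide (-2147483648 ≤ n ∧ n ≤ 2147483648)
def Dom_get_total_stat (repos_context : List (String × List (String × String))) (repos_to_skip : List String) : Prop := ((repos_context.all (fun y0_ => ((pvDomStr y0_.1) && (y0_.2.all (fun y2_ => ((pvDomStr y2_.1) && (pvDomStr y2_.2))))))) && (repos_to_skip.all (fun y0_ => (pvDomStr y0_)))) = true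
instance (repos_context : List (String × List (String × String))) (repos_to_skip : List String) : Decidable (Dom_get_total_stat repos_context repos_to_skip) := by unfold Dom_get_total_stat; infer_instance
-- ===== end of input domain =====

-- B builds one status-frequency table in a single pass and reads the three counts from it,
-- instead of A's three separate filtered scans (objective: idiomatic; same cost).

-- ===== PORT A =====
-- r['status'] (key guaranteed present by Pre_; Python raises KeyError otherwise)
def pvStatus (r : List (String × String)) : String := PySem.Dict.getD (PySem.Dict.mk r) "status" ""

def get_total_stat (repos_context : List (String × List (String × String))) (repos_to_skip : List String) : List (String × Int) :=
  [("checked_repos_number", (repos_context.length : Int)),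
   ("skipped_repos_number", (repos_to_skip.length : Int)),
   ("total_repos_number", (repos_context.length : Int) + (repos_to_skip.length : Int)),
   ("ok_repos_number",
     (repos_context.map Prod.snd).foldl (fun acc r => if pvStatus r == "ok" then acc + 1 else acc) (0 : Int)),
   ("repos_with_warnings_number",
     (repos_context.map Prod.snd).foldl (fun acc r => if pvStatus r == "warning" then acc + 1 else acc) (0 : Int)),
   ("critical_repos_number",
     (repos_context.map Prod.snd).foldl (fun acc r => if pvStatus r == "critical" then acc + 1 else acc) (0 : Int))]

-- ===== PORT B =====
def get_total_stat_alt (repos_context : List (String × List (String × String))) (repos_to_skip : List String) : List (String × Int) :=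
  -- counts[s] = counts.get(s, 0) + 1 in one loop over the values
  let counts : PySem.Dict String Int :=
    repos_context.foldl (fun d p => d.insert (pvStatus p.2) (d.getD (pvStatus p.2) 0 + 1)) PySem.Dict.empty
  let checked : Int := repos_context.length
  let skipped : Int := repos_to_skip.length
  [("checked_repos_number", checked),
   ("skipped_repos_number", skipped),
   ("total_repos_number", checked + skipped),
   ("ok_repos_number", counts.getD "ok" 0),
   ("repos_with_warnings_number", counts.getD "warning" 0),
   ("critical_repos_number", counts.getD "critical" 0)]

-- ===== PRECONDITION & SPEC =====
-- Pre_ excludes inputs where some repo's dict lacks the key 'status': there both A and B raise KeyError.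
def Pre_get_total_stat (repos_context : List (String × List (String × String))) (repos_to_skip : List String) : Prop :=
  repos_context.all (fun p => PySem.Dict.contains (PySem.Dict.mk p.2) "status") = true

instance (repos_context : List (String × List (String × String))) (repos_to_skip : List String) : Decidable (Pre_get_total_stat repos_context repos_to_skip) := by unfold Pre_get_total_stat; infer_instance

def pvWitness_get_total_stat : (List (String × List (String × String))) × List String :=
  ([("r1", [("status", "ok")]), ("r2", [("status", "warning")])], ["skipped1"])

def Spec_get_total_stat (repos_context : List (String × List (String × String))) (repos_to_skip : List String) (out : List (String × Int)) : Prop := out = get_total_stat_alt repos_context repos_to_skip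
instance (repos_context : List (String × List (String × String))) (repos_to_skip : List String) (out : List (String × Int)) : Decidable (Spec_get_total_stat repos_context repos_to_skip out) := by unfold Spec_get_total_stat; infer_instance

-- ===== CLAIM (what is proved, stated in full; the proofs are below) =====
def Claim_equal_get_total_stat : Prop := ∀ (repos_context : List (String × List (String × String))) (repos_to_skip : List String), Dom_get_total_stat repos_context repos_to_skip → Pre_get_total_stat repos_context repos_to_skip → Spec_get_total_stat repos_context repos_to_skip (get_total_stat repos_context repos_to_skip)

-- ===== LEMMAS AND PROOFS =====

-- A's filtered scan over the values equals the count of s in the list of statuses.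
theorem pv_foldl_count (l : List (List (String × String))) (s : String) (a : Int) :
    l.foldl (fun acc r => if pvStatus r == s then acc + 1 else acc) a
      = a + ((l.map pvStatus).count s : Int) := by
  induction l generalizing a with
  | nil => simp
  | cons h t ih =>
    simp only [List.foldl_cons, List.map_cons, List.count_cons, ih]
    by_cases hs : pvStatus h == s
    · simp [hs]; ring
    · simp [hs]

-- B's insert/getD loop is Counter of the statuses.
theorem pv_counts_eq (repos_context : List (String × List (String × String))) (s : String) :
    (repos_context.foldl (fun d p => d.insert (pvStatus p.2) (d.getD (pvStatus p.2) 0 + 1)) PySem.Dict.empty).getD s 0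
      = (((repos_context.map Prod.snd).map pvStatus).count s : Int) := by
  have h : (repos_context.foldl (fun d p => d.insert (pvStatus p.2) (d.getD (pvStatus p.2) 0 + 1)) PySem.Dict.empty)
      = PySem.Dict.counter (repos_context.map (fun p => pvStatus p.2)) := by
    rw [← PySem.Dict.foldl_insert_getD_add_one_eq_counter]
    rw [List.foldl_map]
  rw [h, PySem.Dict.getD_counter]
  simp [List.map_map, Function.comp_def]

-- ===== VERDICT (by name: the statement is the Claim_ definition above) =====
theorem get_total_stat_spec : Claim_equal_get_total_stat := by
  intro rc sk _ _
  show get_total_stat rc sk = get_total_stat_alt rc sk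
  simp only [get_total_stat, get_total_stat_alt, pv_counts_eq, pv_foldl_count, zero_add]
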